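-- pv_equiv track=rewrite | github.com/claudiordgz/udacity_cs212 | lesson_2/subpalindrome.py | advance_iteration
-- ===== SOURCE A (Python) =====
-- def advance_iteration(N):
--     i, j = 0, 1
--     while j < N:
--         yield i,j
--         j += 1
--         if j == N:
--             break
--         yield i,j
--         i += 1
--         if i == N:
--             break
-- ===== SOURCE B (Python) =====
-- def advance_iteration(N):
--     # Closed form: the t-th emitted pair is (t//2, (t+3)//2), and exactly
--     # max(0, 2*N - 3) pairs are emitted.
--     for t in range(max(0, 2 * N - 3)):
--         yield t // 2, (t + 3) // 2
-- ===== Notes on version B (the rewrite author's own statement) =====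
-- stated objective: alternative
-- what changed: Replaces A's alternating two-pointer state machine with interleaved increments and mid-loop breaks by a closed-form index map: the t-th pair is (t//2, (t+3)//2) for t in range(max(0, 2*N-3)), with the output length computed up front.
import Mathlib
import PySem

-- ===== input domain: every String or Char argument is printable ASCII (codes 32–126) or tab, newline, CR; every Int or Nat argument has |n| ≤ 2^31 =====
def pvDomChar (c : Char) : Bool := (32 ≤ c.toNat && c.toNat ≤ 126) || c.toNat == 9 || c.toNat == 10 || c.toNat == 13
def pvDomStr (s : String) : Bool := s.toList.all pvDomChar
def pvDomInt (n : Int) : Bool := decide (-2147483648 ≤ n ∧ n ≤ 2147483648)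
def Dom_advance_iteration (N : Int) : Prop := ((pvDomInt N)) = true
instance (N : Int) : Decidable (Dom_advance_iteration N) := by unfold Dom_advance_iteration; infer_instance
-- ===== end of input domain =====

-- B replaces A's alternating two-pointer generator state machine by a closed-form index map over one flat range: the t-th pair is (t//2, (t+3)//2), and there are max(0, 2N-3) of them.


-- ===== PORT A =====
-- A's generator loop, state (i, j): each `yield` becomes a cons onto the remaining output;
-- `break` (on j == N or i == N) and the failed `while` test end the list.
-- fuel is only a totality guard: N.toNat bounds the iteration count (j starts at 1 and grows each pass).
def pvALoop (fuel : Nat) (N i j : Int) : List (Int × Int) :=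
  match fuel with
  | 0 => []
  | fuel + 1 =>
    if j < N then
      (i, j) ::
        (let j1 := j + 1
         if j1 = N then []
         else
           (i, j1) ::
             (let i1 := i + 1
              if i1 = N then [] else pvALoop fuel N i1 j1))
    else []

def advance_iteration (N : Int) : List (Int × Int) := pvALoop N.toNat N 0 1

-- ===== PORT B =====
-- B: for t in range(max(0, 2*N-3)) yield (t//2, (t+3)//2)  — a closed-form index map.
def advance_iteration_alt (N : Int) : List (Int × Int) :=
  (PySem.List.pyRange 0 (max 0 (2 * N - 3)) 1).map
    (fun t => (PySem.Int.floordiv t 2, PySem.Int.floordiv (t + 3) 2))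

-- ===== PRECONDITION & SPEC =====
def Spec_advance_iteration (N : Int) (out : List (Int × Int)) : Prop := out = advance_iteration_alt N
instance (N : Int) (out : List (Int × Int)) : Decidable (Spec_advance_iteration N out) := by unfold Spec_advance_iteration; infer_instance

-- ===== CLAIM (what is proved, stated in full; the proofs are below) =====
def Claim_equal_advance_iteration : Prop := ∀ (N : Int), Dom_advance_iteration N → Spec_advance_iteration N (advance_iteration N)

-- ===== LEMMAS AND PROOFS =====
-- Invariant: at the top of A's loop j = i + 1, and the remaining output is the formula
-- mapped over the index range [2*i, 2*N-3).
theorem pvLoop_eq : ∀ (fuel : Nat) (N i : Int), (N - i).toNat ≤ fuel →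
    pvALoop fuel N i (i + 1) =
      (PySem.List.pyRange (2 * i) (2 * N - 3) 1).map
        (fun t => (PySem.Int.floordiv t 2, PySem.Int.floordiv (t + 3) 2)) := by
  intro fuel
  induction fuel with
  | zero =>
    intro N i h
    have : 2 * N - 3 ≤ 2 * i := by omega
    rw [pvALoop, PySem.List.pyRange_one_eq_nil this]
    simp
  | succ n ih =>
    intro N i h
    rw [pvALoop]
    by_cases h1 : i + 1 < N
    · rw [PySem.List.pyRange_one_cons (by omega : 2 * i < 2 * N - 3)]
      have e1 : PySem.Int.floordiv (2 * i) 2 = i := by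
        rw [PySem.Int.floordiv_eq_iff_of_pos] <;> omega
      have e2 : PySem.Int.floordiv (2 * i + 3) 2 = i + 1 := by
        rw [PySem.Int.floordiv_eq_iff_of_pos] <;> omega
      by_cases h2 : i + 1 + 1 = N
      · rw [PySem.List.pyRange_one_eq_nil (by omega : 2 * N - 3 ≤ 2 * i + 1)]
        simp [h1, h2]
        omega
      · rw [PySem.List.pyRange_one_cons (by omega : 2 * i + 1 < 2 * N - 3)]
        have e3 : PySem.Int.floordiv (2 * i + 1) 2 = i := by
          rw [PySem.Int.floordiv_eq_iff_of_pos] <;> omega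
        have e4 : PySem.Int.floordiv (2 * i + 1 + 3) 2 = i + 2 := by
          rw [PySem.Int.floordiv_eq_iff_of_pos] <;> omega
        have h3 : ¬ i + 1 = N := by omega
        have := ih N (i + 1) (by omega)
        rw [show (2 * i + 1 + 1) = 2 * (i + 1) by ring]
        simp only [h1, if_pos, h2, ite_false, h3, List.map_cons, e1, e2, e3, e4]
        rw [this, show i + 1 + 1 = i + 2 from by ring]
    · have h2 : 2 * N - 3 ≤ 2 * i := by omega
      rw [PySem.List.pyRange_one_eq_nil h2]
      simp [h1]

-- ===== VERDICT (by name: the statement is the Claim_ definition above) =====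
theorem advance_iteration_spec : Claim_equal_advance_iteration := by
  intro N _
  unfold Spec_advance_iteration advance_iteration advance_iteration_alt
  have hm : PySem.List.pyRange 0 (max 0 (2 * N - 3)) 1 = PySem.List.pyRange 0 (2 * N - 3) 1 := by
    by_cases h : 2 * N - 3 ≤ 0
    · rw [PySem.List.pyRange_one_eq_nil (by omega), PySem.List.pyRange_one_eq_nil (by omega)]
    · rw [max_eq_right (by omega : (0:Int) ≤ 2 * N - 3)]
  rw [hm, show (0 : Int) = 2 * 0 by ring]
  exact pvLoop_eq N.toNat N 0 (by omega)
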